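-- pv_equiv track=rewrite | github.com/danmac423/FlashVSR_Ultra_Fast | main.py | calculate_spatial_tile_coords
-- ===== SOURCE A (Python) =====
-- import math
-- from typing import Tuple, List
--
-- def calculate_spatial_tile_coords(
--     height: int, width: int, tile_size: Tuple[int, int], overlap: int
-- ) -> List[Tuple[int, int, int, int]]:
--     """Calculate spatial tile coordinates with overlap for tiled processing.
--
--     Args:
--         height (int): Height of the frame
--         width (int): Width of the frame
--         tile_size (Tuple[int, int]): (tile_width, tile_height)
--         overlap (int): Overlap size
--
--     Returns:
--         List: List of tile coordinates (x1, y1, x2, y2)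
--     """
--     coords = []
--     tile_w, tile_h = tile_size
--
--     stride_w = tile_w - overlap
--     stride_h = tile_h - overlap
--
--     num_rows = math.ceil((height - overlap) / stride_h)
--     num_cols = math.ceil((width - overlap) / stride_w)
--
--     for r in range(num_rows):
--         for c in range(num_cols):
--             y1 = r * stride_h
--             x1 = c * stride_w
--
--             y2 = min(y1 + tile_h, height)
--             x2 = min(x1 + tile_w, width)
--
--             if y2 - y1 < tile_h:
--                 y1 = max(0, y2 - tile_h)
--             if x2 - x1 < tile_w:
--                 x1 = max(0, x2 - tile_w)
--
--             coords.append((x1, y1, x2, y2))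
--
--     return coords
-- ===== SOURCE B (Python) =====
-- import math
-- from typing import Tuple, List
--
-- def calculate_spatial_tile_coords(
--     height: int, width: int, tile_size: Tuple[int, int], overlap: int
-- ) -> List[Tuple[int, int, int, int]]:
--     """Precompute the column spans and the row spans once each, then take
--     their cartesian product (row-major) to assemble the tile coordinates."""
--     tile_w, tile_h = tile_size
--     stride_w = tile_w - overlap
--     stride_h = tile_h - overlap
--
--     num_rows = math.ceil((height - overlap) / stride_h)
--     num_cols = math.ceil((width - overlap) / stride_w)
--
--     if num_rows <= 0 or num_cols <= 0:
--         return []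
--
--     xs = []
--     for c in range(num_cols):
--         x1 = c * stride_w
--         x2 = min(x1 + tile_w, width)
--         if x2 - x1 < tile_w:
--             x1 = max(0, x2 - tile_w)
--         xs.append((x1, x2))
--
--     ys = []
--     for r in range(num_rows):
--         y1 = r * stride_h
--         y2 = min(y1 + tile_h, height)
--         if y2 - y1 < tile_h:
--             y1 = max(0, y2 - tile_h)
--         ys.append((y1, y2))
--
--     return [(x1, y1, x2, y2) for (y1, y2) in ys for (x1, x2) in xs]
-- ===== Notes on version B (the rewrite author's own statement) =====
-- stated objective: alternative
-- what changed: B materializes the column spans and row spans as two separate 1-D tables and assembles the grid as their cartesian product, instead of A's nested loop recomputing both clamps for every tile; Pre_ excludes tile_w == overlap or tile_h == overlap, where both programs raise ZeroDivisionError.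
import Mathlib
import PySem

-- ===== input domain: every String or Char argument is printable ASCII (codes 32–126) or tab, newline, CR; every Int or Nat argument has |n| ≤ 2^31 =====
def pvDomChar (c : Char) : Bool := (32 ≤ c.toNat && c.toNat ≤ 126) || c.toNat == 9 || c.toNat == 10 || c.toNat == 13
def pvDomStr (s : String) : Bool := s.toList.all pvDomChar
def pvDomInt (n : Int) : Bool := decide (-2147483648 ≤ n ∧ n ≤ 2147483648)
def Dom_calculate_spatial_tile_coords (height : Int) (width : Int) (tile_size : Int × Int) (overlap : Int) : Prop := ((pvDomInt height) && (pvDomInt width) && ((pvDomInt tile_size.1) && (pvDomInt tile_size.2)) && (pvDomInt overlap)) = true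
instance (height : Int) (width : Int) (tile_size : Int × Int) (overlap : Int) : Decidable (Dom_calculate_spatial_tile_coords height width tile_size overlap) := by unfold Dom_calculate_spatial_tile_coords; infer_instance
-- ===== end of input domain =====

-- B precomputes the column spans and row spans in two separate passes and assembles
-- the grid as their cartesian product, instead of A's nested per-tile recomputation
-- (objective: alternative decomposition; O(R+C) clamp computations instead of O(R*C)).

-- ===== PORT A =====
-- math.ceil((a)/b) on ints: exact ceiling division -((-a)//b); for |a|,|b| ≤ 2^32 the
-- float rounding error of Python's true division is < 1/(2^21·|b|) while a non-integer
-- quotient is ≥ 1/|b| away from any integer, so float ceil = exact ceil on all of Dom.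
def calculate_spatial_tile_coords (height : Int) (width : Int) (tile_size : Int × Int) (overlap : Int) : List (Int × Int × Int × Int) :=
  let tile_w := tile_size.1
  let tile_h := tile_size.2
  let stride_w := tile_w - overlap
  let stride_h := tile_h - overlap
  let num_rows := -(PySem.Int.floordiv (-(height - overlap)) stride_h)
  let num_cols := -(PySem.Int.floordiv (-(width - overlap)) stride_w)
  (PySem.List.pyRange 0 num_rows 1).foldl (fun coords r =>
    (PySem.List.pyRange 0 num_cols 1).foldl (fun coords c =>
      let y1 := r * stride_h
      let x1 := c * stride_w
      let y2 := min (y1 + tile_h) height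
      let x2 := min (x1 + tile_w) width
      let y1 := if y2 - y1 < tile_h then max 0 (y2 - tile_h) else y1
      let x1 := if x2 - x1 < tile_w then max 0 (x2 - tile_w) else x1
      coords ++ [(x1, y1, x2, y2)]) coords) []

-- ===== PORT B =====
def calculate_spatial_tile_coords_alt (height : Int) (width : Int) (tile_size : Int × Int) (overlap : Int) : List (Int × Int × Int × Int) :=
  let tile_w := tile_size.1
  let tile_h := tile_size.2
  let stride_w := tile_w - overlap
  let stride_h := tile_h - overlap
  let num_rows := -(PySem.Int.floordiv (-(height - overlap)) stride_h)
  let num_cols := -(PySem.Int.floordiv (-(width - overlap)) stride_w)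
  if num_rows ≤ 0 ∨ num_cols ≤ 0 then [] else
  let xs := (PySem.List.pyRange 0 num_cols 1).map (fun c =>
    let x1 := c * stride_w
    let x2 := min (x1 + tile_w) width
    ((if x2 - x1 < tile_w then max 0 (x2 - tile_w) else x1), x2))
  let ys := (PySem.List.pyRange 0 num_rows 1).map (fun r =>
    let y1 := r * stride_h
    let y2 := min (y1 + tile_h) height
    ((if y2 - y1 < tile_h then max 0 (y2 - tile_h) else y1), y2))
  ys.flatMap (fun y => xs.map (fun x => (x.1, y.1, x.2, y.2)))

-- ===== PRECONDITION & SPEC =====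
-- A raises ZeroDivisionError when a stride is zero (tile_w = overlap or tile_h = overlap); Pre_ excludes exactly those inputs
def Pre_calculate_spatial_tile_coords (height : Int) (width : Int) (tile_size : Int × Int) (overlap : Int) : Prop :=
  tile_size.1 ≠ overlap ∧ tile_size.2 ≠ overlap
instance (height : Int) (width : Int) (tile_size : Int × Int) (overlap : Int) : Decidable (Pre_calculate_spatial_tile_coords height width tile_size overlap) := by unfold Pre_calculate_spatial_tile_coords; infer_instance
def pvWitness_calculate_spatial_tile_coords : Int × Int × (Int × Int) × Int := (10, 10, (4, 4), 1)

def Spec_calculate_spatial_tile_coords (height : Int) (width : Int) (tile_size : Int × Int) (overlap : Int) (out : List (Int × Int × Int × Int)) : Prop := out = calculate_spatial_tile_coords_alt height width tile_size overlap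
instance (height : Int) (width : Int) (tile_size : Int × Int) (overlap : Int) (out : List (Int × Int × Int × Int)) : Decidable (Spec_calculate_spatial_tile_coords height width tile_size overlap out) := by unfold Spec_calculate_spatial_tile_coords; infer_instance

-- ===== CLAIM (what is proved, stated in full; the proofs are below) =====
def Claim_equal_calculate_spatial_tile_coords : Prop := ∀ (height : Int) (width : Int) (tile_size : Int × Int) (overlap : Int), Dom_calculate_spatial_tile_coords height width tile_size overlap → Pre_calculate_spatial_tile_coords height width tile_size overlap → Spec_calculate_spatial_tile_coords height width tile_size overlap (calculate_spatial_tile_coords height width tile_size overlap)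

-- ===== LEMMAS AND PROOFS =====

-- ===== VERDICT (by name: the statement is the Claim_ definition above) =====
theorem calculate_spatial_tile_coords_spec : Claim_equal_calculate_spatial_tile_coords := by
  intro height width tile_size overlap _ _
  unfold Spec_calculate_spatial_tile_coords calculate_spatial_tile_coords calculate_spatial_tile_coords_alt
  simp only [PySem.List.foldl_append_singleton_eq_map]
  rw [PySem.List.foldl_append_eq_flatMap]
  split_ifs with h
  · rcases h with h | h
    · rw [PySem.List.pyRange_one_eq_nil (a := (0:Int)) h]; simp
    · rw [PySem.List.pyRange_one_eq_nil (a := (0:Int)) h]; simp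
  · simp only [List.flatMap_map, List.map_map, Function.comp_def, List.nil_append]
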